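-- pv_equiv track=rewrite | github.com/Adeeshaj/Digital-Tranformation-Project | src/lib/proposal_lib.py | get_transfer_assets
-- ===== SOURCE A (Python) =====
-- def get_transfer_assets(boxes, transfer_assets):
--     for box in boxes:
--         keywords = [x.strip() for x in box["text"].split()]
--         keywords = [x.lower() for x in keywords]
--
--         if("disposed" in keywords and "pledge" in keywords and "property" in keywords):
--             if(keywords[-1] == 'n'):
--                 transfer_assets["disposed_pleged_property"]["selection"] = "Y"
--             else:
--                 transfer_assets["disposed_pleged_property"]["selection"] = "N"
--         if("excess" in keywords and "payments" in keywords and "creditors" in keywords):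
--             if(keywords[-1] == 'n'):
--                 transfer_assets["exess_payment_to_creditors"]["selection"] = "Y"
--             else:
--                 transfer_assets["exess_payment_to_creditors"]["selection"] = "N"
--         if("property" in keywords and "seized" in keywords and "creditors" in keywords):
--             if(keywords[-1] == 'n'):
--                 transfer_assets["property_seized"]["selection"] = "Y"
--             else:
--                 transfer_assets["property_seized"]["selection"] = "N"
--         if("disposed" in keywords and "transferred" in keywords and "property" in keywords):
--             if(keywords[-1] == 'n'):
--                 transfer_assets["sold_property"]["selection"] = "Y"
--             else:
--                 transfer_assets["sold_property"]["selection"] = "N"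
--         if("made" in keywords and "gifts" in keywords and "relatives" in keywords):
--             if(keywords[-1] == 'n'):
--                 transfer_assets["gifts"]["selection"] = "Y"
--             else:
--                 transfer_assets["gifts"]["selection"] = "N"
--         if("expect" in keywords and "receive" in keywords and "money" in keywords):
--             if(keywords[-1] == 'n'):
--                 transfer_assets["expect_money"]["selection"] = "Y"
--             else:
--                 transfer_assets["expect_money"]["selection"] = "N"
--
--     return transfer_assets
-- ===== SOURCE B (Python) =====
-- # Data-driven re-implementation: one config table + per-target reverse search for the
-- # last matching box (A: six unrolled if-blocks re-run per box, later boxes overwriting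
-- # earlier writes). Return-value equivalent; like A it mutates transfer_assets in place.
--
-- CONFIG = [
--     (("disposed", "pledge", "property"), "disposed_pleged_property"),
--     (("excess", "payments", "creditors"), "exess_payment_to_creditors"),
--     (("property", "seized", "creditors"), "property_seized"),
--     (("disposed", "transferred", "property"), "sold_property"),
--     (("made", "gifts", "relatives"), "gifts"),
--     (("expect", "receive", "money"), "expect_money"),
-- ]
--
--
-- def get_transfer_assets(boxes, transfer_assets):
--     tokenized = [[w.strip().lower() for w in box["text"].split()] for box in boxes]
--     for required, target in CONFIG:
--         kws = next((k for k in reversed(tokenized) if all(r in k for r in required)), None)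
--         if kws is not None:
--             transfer_assets[target]["selection"] = "Y" if kws[-1] == "n" else "N"
--     return transfer_assets
-- ===== Notes on version B (the rewrite author's own statement) =====
-- stated objective: simpler
-- what changed: A runs six unrolled keyword-triple if-blocks on every box, later boxes overwriting earlier writes; B builds a config table of (required keywords, target key) and, per target, scans the tokenized boxes in reverse for the last matching box and writes the flag once.
import Mathlib
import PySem

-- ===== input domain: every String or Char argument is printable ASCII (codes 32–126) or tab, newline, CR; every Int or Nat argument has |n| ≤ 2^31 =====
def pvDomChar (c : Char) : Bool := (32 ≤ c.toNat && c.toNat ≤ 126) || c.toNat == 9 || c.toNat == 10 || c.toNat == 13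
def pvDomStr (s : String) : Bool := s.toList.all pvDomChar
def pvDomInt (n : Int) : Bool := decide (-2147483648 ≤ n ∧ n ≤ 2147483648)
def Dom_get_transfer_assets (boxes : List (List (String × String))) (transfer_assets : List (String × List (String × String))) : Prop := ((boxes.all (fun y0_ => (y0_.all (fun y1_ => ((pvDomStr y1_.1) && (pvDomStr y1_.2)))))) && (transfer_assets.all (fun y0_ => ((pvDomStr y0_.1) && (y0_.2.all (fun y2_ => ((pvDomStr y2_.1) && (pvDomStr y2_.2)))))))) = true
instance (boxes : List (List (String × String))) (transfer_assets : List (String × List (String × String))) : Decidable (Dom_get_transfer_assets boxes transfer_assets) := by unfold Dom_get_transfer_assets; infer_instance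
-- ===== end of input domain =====

-- B replaces A's six unrolled per-box keyword blocks by a config table scanned per target
-- (objective: simpler); return-value equivalence — in Python both mutate transfer_assets in place.

-- ===== PORT A =====
-- literal port of A: fold over boxes, six unrolled if-blocks;
-- box["text"] / transfer_assets[key] (KeyError on a missing key) are ported with
-- getD/modify defaults and the KeyError inputs are excluded by Pre_ below.
def get_transfer_assets (boxes : List (List (String × String))) (transfer_assets : List (String × List (String × String))) : List (String × List (String × String)) :=
  boxes.foldl (fun ta box =>
    let keywords := (PySem.Str.split₀ (PySem.Dict.getD (PySem.Dict.mk box) "text" "")).map (fun x => PySem.Str.strip x)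
    let keywords := keywords.map (fun x => PySem.Str.lower x)
    let ta := if keywords.contains "disposed" && keywords.contains "pledge" && keywords.contains "property" then
        if PySem.List.pyGet? keywords (-1) == some "n" then
          ((PySem.Dict.mk ta).modify "disposed_pleged_property" [] (fun d => ((PySem.Dict.mk d).insert "selection" "Y").items)).items
        else
          ((PySem.Dict.mk ta).modify "disposed_pleged_property" [] (fun d => ((PySem.Dict.mk d).insert "selection" "N").items)).items
      else ta
    let ta := if keywords.contains "excess" && keywords.contains "payments" && keywords.contains "creditors" then
        if PySem.List.pyGet? keywords (-1) == some "n" then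
          ((PySem.Dict.mk ta).modify "exess_payment_to_creditors" [] (fun d => ((PySem.Dict.mk d).insert "selection" "Y").items)).items
        else
          ((PySem.Dict.mk ta).modify "exess_payment_to_creditors" [] (fun d => ((PySem.Dict.mk d).insert "selection" "N").items)).items
      else ta
    let ta := if keywords.contains "property" && keywords.contains "seized" && keywords.contains "creditors" then
        if PySem.List.pyGet? keywords (-1) == some "n" then
          ((PySem.Dict.mk ta).modify "property_seized" [] (fun d => ((PySem.Dict.mk d).insert "selection" "Y").items)).items
        else
          ((PySem.Dict.mk ta).modify "property_seized" [] (fun d => ((PySem.Dict.mk d).insert "selection" "N").items)).items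
      else ta
    let ta := if keywords.contains "disposed" && keywords.contains "transferred" && keywords.contains "property" then
        if PySem.List.pyGet? keywords (-1) == some "n" then
          ((PySem.Dict.mk ta).modify "sold_property" [] (fun d => ((PySem.Dict.mk d).insert "selection" "Y").items)).items
        else
          ((PySem.Dict.mk ta).modify "sold_property" [] (fun d => ((PySem.Dict.mk d).insert "selection" "N").items)).items
      else ta
    let ta := if keywords.contains "made" && keywords.contains "gifts" && keywords.contains "relatives" then
        if PySem.List.pyGet? keywords (-1) == some "n" then
          ((PySem.Dict.mk ta).modify "gifts" [] (fun d => ((PySem.Dict.mk d).insert "selection" "Y").items)).items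
        else
          ((PySem.Dict.mk ta).modify "gifts" [] (fun d => ((PySem.Dict.mk d).insert "selection" "N").items)).items
      else ta
    let ta := if keywords.contains "expect" && keywords.contains "receive" && keywords.contains "money" then
        if PySem.List.pyGet? keywords (-1) == some "n" then
          ((PySem.Dict.mk ta).modify "expect_money" [] (fun d => ((PySem.Dict.mk d).insert "selection" "Y").items)).items
        else
          ((PySem.Dict.mk ta).modify "expect_money" [] (fun d => ((PySem.Dict.mk d).insert "selection" "N").items)).items
      else ta
    ta) transfer_assets

-- ===== PORT B =====
-- helpers of B (CONFIG table, tokenizer, keyword test, one flag write)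
def pvConfig : List (List String × String) :=
  [ (["disposed", "pledge", "property"], "disposed_pleged_property"),
    (["excess", "payments", "creditors"], "exess_payment_to_creditors"),
    (["property", "seized", "creditors"], "property_seized"),
    (["disposed", "transferred", "property"], "sold_property"),
    (["made", "gifts", "relatives"], "gifts"),
    (["expect", "receive", "money"], "expect_money") ]

def pvTokens (box : List (String × String)) : List String :=
  (PySem.Str.split₀ (PySem.Dict.getD (PySem.Dict.mk box) "text" "")).map
    (fun w => PySem.Str.lower (PySem.Str.strip w))

def pvMatch (req : List String) (kws : List String) : Bool := req.all (fun r => kws.contains r)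

def pvSetSel (ta : List (String × List (String × String))) (tgt : String) (v : String) : List (String × List (String × String)) :=
  ((PySem.Dict.mk ta).modify tgt [] (fun d => ((PySem.Dict.mk d).insert "selection" v).items)).items

-- port of B: tokenize once, then per config entry take the last matching box
def get_transfer_assets_alt (boxes : List (List (String × String))) (transfer_assets : List (String × List (String × String))) : List (String × List (String × String)) :=
  let tokenized := boxes.map pvTokens
  pvConfig.foldl (fun ta e =>
    match tokenized.reverse.find? (fun kws => pvMatch e.1 kws) with
    | some kws => pvSetSel ta e.2 (if PySem.List.pyGet? kws (-1) == some "n" then "Y" else "N")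
    | none => ta) transfer_assets

-- ===== PRECONDITION & SPEC =====
-- Pre_ excludes exactly the KeyError inputs of the Python: a box without the "text" key,
-- and a matched config entry whose target key is missing from transfer_assets.
def Pre_get_transfer_assets (boxes : List (List (String × String))) (transfer_assets : List (String × List (String × String))) : Prop :=
  (∀ box ∈ boxes, (PySem.Dict.mk box).contains "text" = true) ∧
  (∀ e ∈ pvConfig, (∃ box ∈ boxes, pvMatch e.1 (pvTokens box) = true) →
    (PySem.Dict.mk transfer_assets).contains e.2 = true)
instance (boxes : List (List (String × String))) (transfer_assets : List (String × List (String × String))) : Decidable (Pre_get_transfer_assets boxes transfer_assets) := by unfold Pre_get_transfer_assets; infer_instance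

def pvWitness_get_transfer_assets : (List (List (String × String))) × (List (String × List (String × String))) :=
  ([[("text", "Expect to receive money? N")]], [("expect_money", [("selection", "X")])])

def Spec_get_transfer_assets (boxes : List (List (String × String))) (transfer_assets : List (String × List (String × String))) (out : List (String × List (String × String))) : Prop := out = get_transfer_assets_alt boxes transfer_assets
instance (boxes : List (List (String × String))) (transfer_assets : List (String × List (String × String))) (out : List (String × List (String × String))) : Decidable (Spec_get_transfer_assets boxes transfer_assets out) := by unfold Spec_get_transfer_assets; infer_instance

-- ===== CLAIM (what is proved, stated in full; the proofs are below) =====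
def Claim_equal_get_transfer_assets : Prop := ∀ (boxes : List (List (String × String))) (transfer_assets : List (String × List (String × String))), Dom_get_transfer_assets boxes transfer_assets → Pre_get_transfer_assets boxes transfer_assets → Spec_get_transfer_assets boxes transfer_assets (get_transfer_assets boxes transfer_assets)

-- ===== LEMMAS AND PROOFS =====

-- proof-side abbreviations for the two loop bodies
def pvUpd (e : List String × String) (kws : List String) (ta : List (String × List (String × String))) : List (String × List (String × String)) :=
  pvSetSel ta e.2 (if PySem.List.pyGet? kws (-1) == some "n" then "Y" else "N")

def pvStepA (kws : List String) (ta : List (String × List (String × String))) (e : List String × String) : List (String × List (String × String)) :=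
  if pvMatch e.1 kws then pvUpd e kws ta else ta

def pvActB (toks : List (List String)) (ta : List (String × List (String × String))) (e : List String × String) : List (String × List (String × String)) :=
  match toks.reverse.find? (fun kws => pvMatch e.1 kws) with
  | some kws => pvUpd e kws ta
  | none => ta

def pvGood (es : List (List String × String)) (toks : List (List String)) (ta : List (String × List (String × String))) : Prop :=
  ∀ e ∈ es, (∃ kws ∈ toks, pvMatch e.1 kws = true) → (PySem.Dict.mk ta).contains e.2 = true

theorem pv_mk_items {κ ν : Type} (d : PySem.Dict κ ν) : PySem.Dict.mk d.items = d := rfl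

-- inserts at distinct keys commute on the items list once the first key is present
theorem pv_insert_comm (d : PySem.Dict String (List (String × String))) {t t' : String}
    (W w' : List (String × String)) (hne : t ≠ t') (ht : d.contains t = true) :
    ((d.insert t' w').insert t W).items = ((d.insert t W).insert t' w').items := by
  by_cases hc' : d.contains t' = true
  · have h1 : (d.insert t' w').contains t = true := by
      simp [PySem.Dict.contains_insert, ht]
    have h2 : (d.insert t W).contains t' = true := by
      simp [PySem.Dict.contains_insert, hc']
    rw [PySem.Dict.items_insert_of_contains _ _ h1,
      PySem.Dict.items_insert_of_contains _ _ hc',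
      PySem.Dict.items_insert_of_contains _ _ h2,
      PySem.Dict.items_insert_of_contains _ _ ht, List.map_map, List.map_map]
    apply List.map_congr_left
    intro p _
    by_cases e1 : p.1 = t <;> by_cases e2 : p.1 = t' <;>
      simp [Function.comp, e1, e2, hne, Ne.symm hne]
  · have hc'b : d.contains t' = false := by simpa using hc'
    have h1 : (d.insert t' w').contains t = true := by
      simp [PySem.Dict.contains_insert, ht]
    have h2 : (d.insert t W).contains t' = false := by
      simp [PySem.Dict.contains_insert, hc'b, Ne.symm hne]
    rw [PySem.Dict.items_insert_of_contains _ _ h1,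
      PySem.Dict.items_insert_of_not_contains _ _ h2,
      PySem.Dict.items_insert_of_not_contains _ _ hc'b,
      PySem.Dict.items_insert_of_contains _ _ ht, List.map_append]
    simp [Ne.symm hne]

-- writing one flag keeps every already-present key present
theorem pv_contains_setSel {ta : List (String × List (String × String))} {k t v : String}
    (h : (PySem.Dict.mk ta).contains k = true) :
    (PySem.Dict.mk (pvSetSel ta t v)).contains k = true := by
  simp [pvSetSel, PySem.Dict.modify, pv_mk_items, PySem.Dict.contains_insert, h]

-- two writes to the same target collapse to the last one
theorem pv_absorb (ta : List (String × List (String × String))) (t v v' : String) :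
    pvSetSel (pvSetSel ta t v') t v = pvSetSel ta t v := by
  simp [pvSetSel, PySem.Dict.modify, pv_mk_items, PySem.Dict.getD_insert_self,
    PySem.Dict.insert_insert_self]

-- writes to distinct targets commute, provided the first target is already a key
theorem pv_comm (ta : List (String × List (String × String))) {t t' : String} (v v' : String)
    (hne : t ≠ t') (ht : (PySem.Dict.mk ta).contains t = true) :
    pvSetSel (pvSetSel ta t' v') t v = pvSetSel (pvSetSel ta t v) t' v' := by
  unfold pvSetSel PySem.Dict.modify
  simp only [pv_mk_items]
  rw [PySem.Dict.getD_insert_of_ne _ _ _ hne, PySem.Dict.getD_insert_of_ne _ _ _ (Ne.symm hne)]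
  exact pv_insert_comm _ _ _ hne ht

theorem pv_contains_actB {ts : List (List String)} {ta : List (String × List (String × String))}
    {e : List String × String} {k : String}
    (h : (PySem.Dict.mk ta).contains k = true) :
    (PySem.Dict.mk (pvActB ts ta e)).contains k = true := by
  unfold pvActB
  cases ts.reverse.find? (fun kws => pvMatch e.1 kws) with
  | none => exact h
  | some kws => exact pv_contains_setSel h

-- push one flag write through a fold of pvActB over entries with other targets
theorem pv_push (es : List (List String × String)) (ts : List (List String))
    (Z : List (String × List (String × String))) (t v : String)
    (hne : ∀ e' ∈ es, t ≠ e'.2) (ht : (PySem.Dict.mk Z).contains t = true) :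
    pvSetSel (es.foldl (pvActB ts) Z) t v = es.foldl (pvActB ts) (pvSetSel Z t v) := by
  induction es generalizing Z with
  | nil => rfl
  | cons e es ih =>
    simp only [List.foldl_cons]
    have h1 : pvSetSel (pvActB ts Z e) t v = pvActB ts (pvSetSel Z t v) e := by
      unfold pvActB
      cases ts.reverse.find? (fun kws => pvMatch e.1 kws) with
      | none => rfl
      | some kws =>
        exact pv_comm Z _ _ (hne e (List.mem_cons_self)) ht
    rw [← h1, ih (pvActB ts Z e) (fun e' h' => hne e' (List.mem_cons_of_mem _ h')) (pv_contains_actB ht)]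

theorem pv_actB_append (ts : List (List String)) (kws : List String)
    (ta : List (String × List (String × String))) (e : List String × String) :
    pvActB (ts ++ [kws]) ta e = if pvMatch e.1 kws then pvUpd e kws ta else pvActB ts ta e := by
  unfold pvActB
  rw [List.reverse_append]
  simp only [List.reverse_cons, List.reverse_nil, List.nil_append, List.singleton_append,
    List.find?_cons]
  cases h : pvMatch e.1 kws <;> simp [h]

-- one appended box: A's per-box pass on top of B's fold equals B's fold on the longer list
theorem pv_step (es : List (List String × String)) (ts : List (List String)) (kws : List String)
    (ta : List (String × List (String × String)))
    (hpw : es.Pairwise (fun a b => a.2 ≠ b.2)) (hg : pvGood es (ts ++ [kws]) ta) :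
    es.foldl (pvStepA kws) (es.foldl (pvActB ts) ta) = es.foldl (pvActB (ts ++ [kws])) ta := by
  induction es generalizing ta with
  | nil => rfl
  | cons e es ih =>
    simp only [List.foldl_cons]
    rcases List.pairwise_cons.mp hpw with ⟨hhead, htail⟩
    have hgtail : pvGood es (ts ++ [kws]) ta := fun e' h' => hg e' (List.mem_cons_of_mem _ h')
    cases hm : pvMatch e.1 kws with
    | false =>
      have hA : pvActB (ts ++ [kws]) ta e = pvActB ts ta e := by
        rw [pv_actB_append]; simp [hm]
      rw [hA]
      have hg' : pvGood es (ts ++ [kws]) (pvActB ts ta e) := by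
        intro e' h' hm'
        exact pv_contains_actB (hgtail e' h' hm')
      have := ih (pvActB ts ta e) htail hg'
      rw [show pvStepA kws (es.foldl (pvActB ts) (pvActB ts ta e)) e
            = es.foldl (pvActB ts) (pvActB ts ta e) by simp [pvStepA, hm]]
      exact this
    | true =>
      have hcont : (PySem.Dict.mk ta).contains e.2 = true := by
        exact hg e (List.mem_cons_self) ⟨kws, by simp, hm⟩
      have hstep : pvStepA kws (es.foldl (pvActB ts) (pvActB ts ta e)) e
          = es.foldl (pvActB ts) (pvActB (ts ++ [kws]) ta e) := by
        have habs : pvSetSel (pvActB ts ta e) e.2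
            (if PySem.List.pyGet? kws (-1) == some "n" then "Y" else "N")
            = pvActB (ts ++ [kws]) ta e := by
          rw [pv_actB_append]
          simp only [hm, if_true]
          unfold pvActB
          cases ts.reverse.find? (fun k => pvMatch e.1 k) with
          | none => rfl
          | some kws' => exact pv_absorb ta e.2 _ _
        rw [show pvStepA kws (es.foldl (pvActB ts) (pvActB ts ta e)) e
              = pvSetSel (es.foldl (pvActB ts) (pvActB ts ta e)) e.2
                (if PySem.List.pyGet? kws (-1) == some "n" then "Y" else "N") by
            simp [pvStepA, hm, pvUpd]]
        rw [pv_push es ts (pvActB ts ta e) _ _ hhead (pv_contains_actB hcont), habs]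
      rw [hstep]
      have hg' : pvGood es (ts ++ [kws]) (pvActB (ts ++ [kws]) ta e) := by
        intro e' h' hm'
        exact pv_contains_actB (hgtail e' h' hm')
      exact ih _ htail hg'

-- the whole of A's loop over the boxes equals B's per-target fold
theorem pv_top (es : List (List String × String)) (toks : List (List String))
    (ta : List (String × List (String × String)))
    (hpw : es.Pairwise (fun a b => a.2 ≠ b.2)) (hg : pvGood es toks ta) :
    toks.foldl (fun ta kws => es.foldl (pvStepA kws) ta) ta = es.foldl (pvActB toks) ta := by
  induction toks using List.reverseRecOn generalizing ta with
  | nil =>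
    simp only [List.foldl_nil]
    rw [show pvActB ([] : List (List String)) = fun d _ => d from rfl, PySem.List.foldl_ignore]
  | append_singleton ts kws ih =>
    rw [List.foldl_append]
    simp only [List.foldl_cons, List.foldl_nil]
    have hgts : pvGood es ts ta := by
      intro e he ⟨k, hk, hmk⟩
      exact hg e he ⟨k, List.mem_append_left _ hk, hmk⟩
    rw [ih ta hgts]
    exact pv_step es ts kws ta hpw hg

-- A's inline per-box body is the fold of pvStepA over the config table
theorem pv_yn (c n : Bool) (t : String) (ta : List (String × List (String × String))) :
    (if c then
      (if n then ((PySem.Dict.mk ta).modify t [] (fun d => ((PySem.Dict.mk d).insert "selection" "Y").items)).items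
       else ((PySem.Dict.mk ta).modify t [] (fun d => ((PySem.Dict.mk d).insert "selection" "N").items)).items)
     else ta)
    = (if c then pvSetSel ta t (if n then "Y" else "N") else ta) := by
  cases c <;> cases n <;> simp [pvSetSel]

theorem pv_A_eq_fold (boxes : List (List (String × String)))
    (ta : List (String × List (String × String))) :
    get_transfer_assets boxes ta
      = (boxes.map pvTokens).foldl (fun ta kws => pvConfig.foldl (pvStepA kws) ta) ta := by
  induction boxes generalizing ta with
  | nil => rfl
  | cons b boxes ih =>
    simp only [List.map_cons, List.foldl_cons]
    rw [show get_transfer_assets (b :: boxes) ta = get_transfer_assets boxes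
          (pvConfig.foldl (pvStepA (pvTokens b)) ta) from ?_, ih]
    show get_transfer_assets (b :: boxes) ta = _
    unfold get_transfer_assets
    simp only [List.foldl_cons]
    congr 1
    simp only [pvConfig, List.foldl_cons, List.foldl_nil, pvStepA, pvUpd, pvMatch,
      List.all_cons, List.all_nil, Bool.and_true, Bool.and_assoc, pvTokens, List.map_map,
      Function.comp_def, pv_yn]

theorem pv_B_eq_fold (boxes : List (List (String × String)))
    (ta : List (String × List (String × String))) :
    get_transfer_assets_alt boxes ta = pvConfig.foldl (pvActB (boxes.map pvTokens)) ta := rfl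

theorem pv_config_pairwise : pvConfig.Pairwise (fun a b => a.2 ≠ b.2) := by
  unfold pvConfig; decide

-- ===== VERDICT (by name: the statement is the Claim_ definition above) =====
theorem get_transfer_assets_spec : Claim_equal_get_transfer_assets := by
  intro boxes ta _ hpre
  unfold Spec_get_transfer_assets
  rw [pv_A_eq_fold, pv_B_eq_fold]
  refine pv_top pvConfig (boxes.map pvTokens) ta pv_config_pairwise ?_
  intro e he ⟨kws, hk, hmk⟩
  rcases List.mem_map.mp hk with ⟨box, hbox, rfl⟩
  exact hpre.2 e he ⟨box, hbox, hmk⟩
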